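-- pv_equiv track=rewrite | github.com/OISF/suricata-verify | tests/flow-force-reuse/test.py | ip_to_mac
-- ===== SOURCE A (Python) =====
-- def ip_to_mac(ip_addr):
--     num = int(ip_addr)
--     mbytes = [0x00, 0x1a, 0xeb]
--     for shift in range(3, 0, -1):
--         mask = 0xff << (8 * shift)
--         byte = (num & mask) >> (8 * shift)
--         mbytes.append(byte)
--     return ':'.join(map(lambda byte: f'{byte:02X}', mbytes))
-- ===== SOURCE B (Python) =====
-- def ip_to_mac(ip_addr):
--     n = int(ip_addr) & 0xFFFFFFFF
--     six = b'\x00\x1a\xeb' + n.to_bytes(4, 'big')[:3]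
--     return ':'.join(f'{b:02X}' for b in six)
-- ===== Notes on version B (the rewrite author's own statement) =====
-- stated objective: simpler
-- what changed: B replaces A's mask/shift accumulation loop by slicing the high three bytes out of the big-endian 4-byte encoding of ip & 0xFFFFFFFF and joining them after the fixed OUI prefix.
import Mathlib
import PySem

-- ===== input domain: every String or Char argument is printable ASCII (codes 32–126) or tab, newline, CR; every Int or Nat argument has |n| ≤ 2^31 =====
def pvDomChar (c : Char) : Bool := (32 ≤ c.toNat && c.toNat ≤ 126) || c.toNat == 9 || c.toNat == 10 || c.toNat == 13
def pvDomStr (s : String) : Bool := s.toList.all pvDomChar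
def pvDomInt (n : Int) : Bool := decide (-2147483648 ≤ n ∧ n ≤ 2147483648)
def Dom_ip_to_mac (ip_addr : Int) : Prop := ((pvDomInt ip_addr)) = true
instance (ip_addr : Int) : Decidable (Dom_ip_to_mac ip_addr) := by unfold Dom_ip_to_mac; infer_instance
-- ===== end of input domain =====

-- B builds the three address bytes as a slice of the big-endian 4-byte encoding of (ip & 0xFFFFFFFF)
-- instead of A's mask/shift loop; objective: simpler (no measured speed claim).

-- f'{b:02X}': uppercase hex, zero-padded to width 2 — exact for 0 ≤ b < 256, the only
-- values either Python ever formats here (each byte is a masked 8-bit value).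
def pvHexDigit (d : Nat) : Char :=
  if d < 10 then Char.ofNat (48 + d) else Char.ofNat (55 + d)

def pvFmt02X (b : Int) : String :=
  String.ofList [pvHexDigit (b.toNat / 16 % 16), pvHexDigit (b.toNat % 16)]

-- ===== PORT A =====
def ip_to_mac (ip_addr : Int) : String :=
  let num := ip_addr
  let mbytes : List Int := [0x00, 0x1a, 0xeb]
  let mbytes := (PySem.List.pyRange 3 0 (-1)).foldl (fun mb shift =>
      let sh : Nat := (8 * shift).toNat
      let mask : Int := (255 : Int) <<< sh
      let byte : Int := (PySem.Int.band num mask) >>> sh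
      mb ++ [byte]) mbytes
  PySem.Str.join ":" (mbytes.map pvFmt02X)

-- ===== PORT B =====
-- n.to_bytes(4, 'big') for 0 ≤ n < 2^32 — the guaranteed range after the & 0xFFFFFFFF mask.
def pvToBytesBE4 (n : Nat) : List Int :=
  [(n / 2^24 % 256 : Nat), (n / 2^16 % 256 : Nat), (n / 2^8 % 256 : Nat), (n % 256 : Nat)]

def ip_to_mac_alt (ip_addr : Int) : String :=
  let n := PySem.Int.band ip_addr 0xFFFFFFFF
  let six : List Int := [0x00, 0x1a, 0xeb] ++ (pvToBytesBE4 n.toNat).take 3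
  PySem.Str.join ":" (six.map pvFmt02X)

-- ===== PRECONDITION & SPEC =====
def Spec_ip_to_mac (ip_addr : Int) (out : String) : Prop := out = ip_to_mac_alt ip_addr
instance (ip_addr : Int) (out : String) : Decidable (Spec_ip_to_mac ip_addr out) := by unfold Spec_ip_to_mac; infer_instance

-- ===== CLAIM (what is proved, stated in full; the proofs are below) =====
def Claim_equal_ip_to_mac : Prop := ∀ (ip_addr : Int), Dom_ip_to_mac ip_addr → Spec_ip_to_mac ip_addr (ip_to_mac ip_addr)

-- ===== LEMMAS AND PROOFS =====

-- bits 8s..8s+7 in place: t &&& (255 <<< m) = (t / 2^m % 256) * 2^m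
lemma pv_and_byte (t m : Nat) : t &&& (255 <<< m) = t / 2^m % 256 * 2^m := by
  have h : t &&& (255 <<< m) = ((t >>> m) &&& 255) <<< m := by
    apply Nat.eq_of_testBit_eq; intro i
    by_cases hmi : m ≤ i
    · simp [Nat.testBit_and, Nat.testBit_shiftLeft, Nat.testBit_shiftRight, hmi,
        Nat.add_sub_cancel' hmi]
    · simp [Nat.testBit_and, Nat.testBit_shiftLeft, Nat.testBit_shiftRight, hmi]
  rw [h]
  have h255 : (255 : Nat) = 2 ^ 8 - 1 := rfl
  rw [h255, Nat.and_two_pow_sub_one_eq_mod, Nat.shiftRight_eq_div_pow, Nat.shiftLeft_eq]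

-- the central fact: A's masked-shift byte equals B's big-endian-encoding byte
lemma pv_byte_eq (num : Int) (hlo : -2147483648 ≤ num) (hhi : num ≤ 2147483648)
    (m : Nat) (hm : m = 8 ∨ m = 16 ∨ m = 24) :
    ((PySem.Int.band num ((255 : Int) <<< m)) >>> m : Int)
      = ((PySem.Int.band num 0xFFFFFFFF).toNat / 2^m % 256 : Nat) := by
  rcases hm with rfl | rfl | rfl
  · by_cases h0 : 0 ≤ num
    · obtain ⟨n, rfl⟩ := Int.eq_ofNat_of_zero_le h0
      rw [PySem.Int.band_of_nonneg h0 (by decide), PySem.Int.band_of_nonneg h0 (by decide)]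
      norm_num
      rw [show ∀ k j : Nat, ((k : Int) >>> j) = ((k >>> j : Nat) : Int) from fun _ _ => rfl]
      norm_cast
      rw [pv_and_byte, Nat.shiftRight_eq_div_pow,
          show (4294967295:Nat) = 2^32-1 from rfl, Nat.and_two_pow_sub_one_eq_mod,
          Nat.mod_eq_of_lt (show n < 2^32 by omega)]
      omega
    · rw [PySem.Int.band, PySem.Int.band]
      norm_num [Int.shiftLeft_eq, h0]
      rw [show ∀ k j : Nat, ((k : Int) >>> j) = ((k >>> j : Nat) : Int) from fun _ _ => rfl]
      norm_cast
      set t := (-num).toNat - 1 with htdef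
      have e1 : (65280:Nat) &&& t = t / 2^8 % 256 * 2^8 := by
        rw [Nat.and_comm]; exact pv_and_byte t 8
      have e2 : (4294967295:Nat) &&& t = t % 2^32 := by
        rw [Nat.and_comm, show (4294967295:Nat) = 2^32-1 from rfl, Nat.and_two_pow_sub_one_eq_mod]
      have ht : t < 2^32 := by omega
      rw [Nat.shiftRight_eq_div_pow, e1, e2]
      omega
  · by_cases h0 : 0 ≤ num
    · obtain ⟨n, rfl⟩ := Int.eq_ofNat_of_zero_le h0
      rw [PySem.Int.band_of_nonneg h0 (by decide), PySem.Int.band_of_nonneg h0 (by decide)]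
      norm_num
      rw [show ∀ k j : Nat, ((k : Int) >>> j) = ((k >>> j : Nat) : Int) from fun _ _ => rfl]
      norm_cast
      rw [pv_and_byte, Nat.shiftRight_eq_div_pow,
          show (4294967295:Nat) = 2^32-1 from rfl, Nat.and_two_pow_sub_one_eq_mod,
          Nat.mod_eq_of_lt (show n < 2^32 by omega)]
      omega
    · rw [PySem.Int.band, PySem.Int.band]
      norm_num [Int.shiftLeft_eq, h0]
      rw [show ∀ k j : Nat, ((k : Int) >>> j) = ((k >>> j : Nat) : Int) from fun _ _ => rfl]
      norm_cast
      set t := (-num).toNat - 1 with htdef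
      have e1 : (16711680:Nat) &&& t = t / 2^16 % 256 * 2^16 := by
        rw [Nat.and_comm]; exact pv_and_byte t 16
      have e2 : (4294967295:Nat) &&& t = t % 2^32 := by
        rw [Nat.and_comm, show (4294967295:Nat) = 2^32-1 from rfl, Nat.and_two_pow_sub_one_eq_mod]
      have ht : t < 2^32 := by omega
      rw [Nat.shiftRight_eq_div_pow, e1, e2]
      omega
  · by_cases h0 : 0 ≤ num
    · obtain ⟨n, rfl⟩ := Int.eq_ofNat_of_zero_le h0
      rw [PySem.Int.band_of_nonneg h0 (by decide), PySem.Int.band_of_nonneg h0 (by decide)]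
      norm_num
      rw [show ∀ k j : Nat, ((k : Int) >>> j) = ((k >>> j : Nat) : Int) from fun _ _ => rfl]
      norm_cast
      rw [pv_and_byte, Nat.shiftRight_eq_div_pow,
          show (4294967295:Nat) = 2^32-1 from rfl, Nat.and_two_pow_sub_one_eq_mod,
          Nat.mod_eq_of_lt (show n < 2^32 by omega)]
      omega
    · rw [PySem.Int.band, PySem.Int.band]
      norm_num [Int.shiftLeft_eq, h0]
      rw [show ∀ k j : Nat, ((k : Int) >>> j) = ((k >>> j : Nat) : Int) from fun _ _ => rfl]
      norm_cast
      set t := (-num).toNat - 1 with htdef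
      have e1 : (4278190080:Nat) &&& t = t / 2^24 % 256 * 2^24 := by
        rw [Nat.and_comm]; exact pv_and_byte t 24
      have e2 : (4294967295:Nat) &&& t = t % 2^32 := by
        rw [Nat.and_comm, show (4294967295:Nat) = 2^32-1 from rfl, Nat.and_two_pow_sub_one_eq_mod]
      have ht : t < 2^32 := by omega
      rw [Nat.shiftRight_eq_div_pow, e1, e2]
      omega

-- ===== VERDICT (by name: the statement is the Claim_ definition above) =====
theorem ip_to_mac_spec : Claim_equal_ip_to_mac := by
  intro ip h
  have hb : -2147483648 ≤ ip ∧ ip ≤ 2147483648 := by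
    simpa [Dom_ip_to_mac, pvDomInt] using h
  have h3 := pv_byte_eq ip hb.1 hb.2 24 (by norm_num)
  have h2 := pv_byte_eq ip hb.1 hb.2 16 (by norm_num)
  have h1 := pv_byte_eq ip hb.1 hb.2 8 (by norm_num)
  unfold Spec_ip_to_mac ip_to_mac ip_to_mac_alt pvToBytesBE4
  rw [show PySem.List.pyRange 3 0 (-1) = [3,2,1] from rfl]
  simp only [List.foldl, List.take, List.cons_append, List.nil_append, List.map]
  rw [show ((8:Int)*3).toNat = 24 from rfl, show ((8:Int)*2).toNat = 16 from rfl,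
      show ((8:Int)*1).toNat = 8 from rfl, h3, h2, h1]
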